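-- pv_equiv track=rewrite | github.com/hexiro/autorequests | autorequests/utils.py | combine_dicts
-- ===== SOURCE A (Python) =====
-- ones_dict = {"1": "one",
--              "2": "two",
--              "3": "three",
--              "4": "four",
--              "5": "five",
--              "6": "six",
--              "7": "seven",
--              "8": "eight",
--              "9": "nine"}
--
-- tens_dict = {"1": "ten",
--              "2": "twenty",
--              "3": "thirty",
--              "4": "forty",
--              "5": "fifty",
--              "6": "sixty",
--              "7": "seventy",
--              "8": "eighty",
--              "9": "ninety"}
--
-- unique_dict = {"11": "eleven",
--                "12": "twelve",
--                "13": "thirteen",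
--                "14": "fourteen",
--                "15": "fifteen",
--                "16": "sixteen",
--                "17": "seventeen",
--                "18": "eighteen",
--                "19": "nineteen"}
--
-- def written_form(num: int) -> str:
--     """ :returns: written form of an integer 0-999 """
--     if num > 999:
--         raise NotImplementedError("numbers > 999 not supported")
--     if num == 0:
--         return "zero"
--     hundreds, tens, ones = str(num).zfill(3)
--     ones_match = ones_dict.get(ones)
--     tens_match = tens_dict.get(tens)
--     unique_match = unique_dict.get((tens + ones))
--     hundreds_match = ones_dict.get(hundreds)
--     written = []
--     if hundreds_match:
--         written.append(hundreds_match + " hundred")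
--     if unique_match:
--         written.append(unique_match)
--     elif tens_match and ones_match:
--         written.append(tens_match + "-" + ones_match)
--     elif tens_match:
--         written.append(tens_match)
--     elif ones_match:
--         written.append(ones_match)
--     return " and ".join(written)
--
-- def unique_name(name: str, other_names: list[str]) -> str:
--     """ :returns a unique name based on the name passed and the taken names """
--     matches = [item for item in other_names if item.startswith(name)]
--     if not any(matches):
--         return name
--     matched_names_length = len(matches)
--     if matched_names_length > 999:
--         raise NotImplementedError(">999 methods with similar names not supported")
--     written = written_form(matched_names_length + 1).replace(" ", "_").replace("-", "_")
--     return name + "_" + written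
--
-- def combine_dicts(dicts: list[dict]) -> dict:
--     """ combines dicts with unique names """
--     combined = {}
--     for dict_ in dicts:
--         for key, value in dict_.items():
--             if key in combined:
--                 key = unique_name(name=key,
--                                   other_names=list(combined.keys()))
--             combined[key] = value
--     return combined
-- ===== SOURCE B (Python) =====
-- # B: instead of rescanning every taken name per duplicate key, keep a counter of how many
-- # taken names start with each prefix (updated once when a key is inserted), and word the
-- # numbered suffix with a direct digit-table converter; objective: asymptotically faster.
--
-- _ONES = ["", "one", "two", "three", "four", "five", "six", "seven", "eight", "nine"]
-- _TENS = ["", "ten", "twenty", "thirty", "forty", "fifty", "sixty", "seventy", "eighty", "ninety"]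
-- _TEENS = ["eleven", "twelve", "thirteen", "fourteen", "fifteen", "sixteen", "seventeen", "eighteen", "nineteen"]
--
-- def _suffix_word(n: int) -> str:
--     """ :returns: underscore-joined English wording of 1 <= n <= 999 """
--     if n > 999:
--         raise NotImplementedError("numbers > 999 not supported")
--     parts = []
--     hundreds, rest = divmod(n, 100)
--     if hundreds:
--         parts.append(_ONES[hundreds] + "_hundred")
--     if 11 <= rest <= 19:
--         parts.append(_TEENS[rest - 11])
--     else:
--         tens, ones = divmod(rest, 10)
--         if tens and ones:
--             parts.append(_TENS[tens] + "_" + _ONES[ones])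
--         elif tens:
--             parts.append(_TENS[tens])
--         elif ones:
--             parts.append(_ONES[ones])
--     return "_and_".join(parts)
--
-- def combine_dicts(dicts: list[dict]) -> dict:
--     """ combines dicts, renaming every already-taken key with a numbered suffix """
--     combined = {}
--     prefix_hits = {}  # prefix -> how many taken names start with it
--     pairs = [item for dict_ in dicts for item in dict_.items()]
--     for key, value in pairs:
--         if key in combined:
--             key = key + "_" + _suffix_word(prefix_hits.get(key, 0) + 1)
--         if key not in combined:
--             for i in range(len(key) + 1):
--                 prefix = key[:i]
--                 prefix_hits[prefix] = prefix_hits.get(prefix, 0) + 1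
--         combined[key] = value
--     return combined
-- ===== Notes on version B (the rewrite author's own statement) =====
-- stated objective: faster
-- what changed: B flattens the pairs once and maintains a prefix-hit counter (each freshly inserted key bumps a counter for every one of its prefixes), so the number of taken names starting with a duplicate key is one dictionary lookup instead of A's per-duplicate startswith scan over all existing keys, and the numbered suffix is worded by a direct digit-table converter instead of A's str/zfill/dict-lookup pipeline with post-hoc replace calls; …
-- outside the precondition, e.g. on combine_dicts([{'': 'x'}, {'': 'y'}]): A returns {'': 'y'}, B returns {'': 'x', '_two': 'y'}
import Mathlib
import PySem

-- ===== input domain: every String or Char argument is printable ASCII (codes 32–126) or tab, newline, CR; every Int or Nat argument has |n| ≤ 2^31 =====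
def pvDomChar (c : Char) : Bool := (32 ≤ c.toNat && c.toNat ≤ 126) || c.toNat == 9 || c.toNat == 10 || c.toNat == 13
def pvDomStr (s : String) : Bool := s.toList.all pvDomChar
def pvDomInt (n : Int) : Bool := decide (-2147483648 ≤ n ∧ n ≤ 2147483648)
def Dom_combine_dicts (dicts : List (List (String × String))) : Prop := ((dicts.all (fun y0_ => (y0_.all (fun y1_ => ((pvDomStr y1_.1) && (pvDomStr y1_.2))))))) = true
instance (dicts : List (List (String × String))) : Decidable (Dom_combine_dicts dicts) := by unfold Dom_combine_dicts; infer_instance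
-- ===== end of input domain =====

-- B replaces A's per-duplicate scan of all taken names by a prefix-hit counter updated once
-- per inserted key, and words the numbered suffix with a direct digit-table converter.

-- ===== PORT A =====
def onesDict : PySem.Dict String String := PySem.Dict.ofList
  [("1","one"),("2","two"),("3","three"),("4","four"),("5","five"),("6","six"),("7","seven"),("8","eight"),("9","nine")]
def tensDict : PySem.Dict String String := PySem.Dict.ofList
  [("1","ten"),("2","twenty"),("3","thirty"),("4","forty"),("5","fifty"),("6","sixty"),("7","seventy"),("8","eighty"),("9","ninety")]
def uniqueDict : PySem.Dict String String := PySem.Dict.ofList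
  [("11","eleven"),("12","twelve"),("13","thirteen"),("14","fourteen"),("15","fifteen"),("16","sixteen"),("17","seventeen"),("18","eighteen"),("19","nineteen")]

-- Python truthiness of an Optional[str]: None and "" are falsy
def truthyStr : Option String → Bool
  | none => false
  | some s => !(s.toList.isEmpty)

def written_form (num : Int) : String :=
  if num > 999 then ""   -- Python raises NotImplementedError here: unreachable under Pre_
  else if num = 0 then "zero"
  else
    match (PySem.Str.zfill (PySem.Int.toStr num) 3).toList with
    | [hundreds, tens, ones] =>
      let ones_match := onesDict.get? (String.ofList [ones])
      let tens_match := tensDict.get? (String.ofList [tens])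
      let unique_match := uniqueDict.get? (String.ofList [tens, ones])
      let hundreds_match := onesDict.get? (String.ofList [hundreds])
      let written : List String := []
      let written := if truthyStr hundreds_match then written ++ [hundreds_match.getD "" ++ " hundred"] else written
      let written :=
        if truthyStr unique_match then written ++ [unique_match.getD ""]
        else if truthyStr tens_match && truthyStr ones_match then written ++ [tens_match.getD "" ++ "-" ++ ones_match.getD ""]
        else if truthyStr tens_match then written ++ [tens_match.getD ""]
        else if ones_match |> truthyStr then written ++ [ones_match.getD ""]
        else written
      PySem.Str.join " and " written
    | _ => ""   -- unpacking a string of length ≠ 3 is a ValueError: unreachable for 1 ≤ num ≤ 999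

def unique_name (name : String) (other_names : List String) : String :=
  let matches_ := other_names.filter (fun item => PySem.Str.startswith item name)
  if !(matches_.any (fun s => !(s.toList.isEmpty))) then name   -- any(): empty strings are falsy
  else
    -- matches_.length > 999: Python raises NotImplementedError (unreachable under Pre_)
    name ++ "_" ++ PySem.Str.replace (PySem.Str.replace (written_form ((matches_.length : Int) + 1)) " " "_") "-" "_"

def pvCombStepA (combined : PySem.Dict String String) (kv : String × String) : PySem.Dict String String :=
  let key := if combined.contains kv.1 then unique_name kv.1 combined.keys else kv.1
  combined.insert key kv.2

def combine_dicts (dicts : List (List (String × String))) : List (String × String) :=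
  (dicts.foldl (fun combined dict_ => dict_.foldl pvCombStepA combined) PySem.Dict.empty).items

-- ===== PORT B =====
def pvOnes : List String := ["", "one", "two", "three", "four", "five", "six", "seven", "eight", "nine"]
def pvTens : List String := ["", "ten", "twenty", "thirty", "forty", "fifty", "sixty", "seventy", "eighty", "ninety"]
def pvTeens : List String := ["eleven", "twelve", "thirteen", "fourteen", "fifteen", "sixteen", "seventeen", "eighteen", "nineteen"]

-- underscore-joined wording of a suffix number (Source B's _suffix_word); list indexing is
-- PySem.List.pyGet? with getD: an IndexError is unreachable for the 1..999 arguments used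
def pvSuffixWord (n : Int) : String :=
  if n > 999 then ""   -- Python raises NotImplementedError here: unreachable under Pre_
  else
    let parts : List String := []
    let hundreds := PySem.Int.floordiv n 100
    let rest := PySem.Int.mod n 100
    let parts := if hundreds ≠ 0 then parts ++ [((PySem.List.pyGet? pvOnes hundreds).getD "") ++ "_hundred"] else parts
    let parts :=
      if 11 ≤ rest ∧ rest ≤ 19 then parts ++ [(PySem.List.pyGet? pvTeens (rest - 11)).getD ""]
      else
        let tens := PySem.Int.floordiv rest 10
        let ones := PySem.Int.mod rest 10
        if tens ≠ 0 ∧ ones ≠ 0 then parts ++ [((PySem.List.pyGet? pvTens tens).getD "") ++ "_" ++ ((PySem.List.pyGet? pvOnes ones).getD "")]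
        else if tens ≠ 0 then parts ++ [(PySem.List.pyGet? pvTens tens).getD ""]
        else if ones ≠ 0 then parts ++ [(PySem.List.pyGet? pvOnes ones).getD ""]
        else parts
    PySem.Str.join "_and_" parts

-- register a freshly inserted key: bump the hit counter of each of its prefixes
def pvRegister (pc : PySem.Dict String Int) (key : String) : PySem.Dict String Int :=
  (PySem.List.pyRange 0 (PySem.Str.len key + 1) 1).foldl
    (fun pc i =>
      let p := PySem.Str.slice key none (some i)
      pc.insert p (pc.getD p 0 + 1)) pc

-- the single loop of Source B over the flattened pair list
def pvGoB : List (String × String) → PySem.Dict String String → PySem.Dict String Int → PySem.Dict String String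
  | [], combined, _ => combined
  | (key, value) :: rest, combined, prefix_hits =>
    let key' := if combined.contains key then key ++ "_" ++ pvSuffixWord (prefix_hits.getD key 0 + 1) else key
    let prefix_hits' := if !(combined.contains key') then pvRegister prefix_hits key' else prefix_hits
    pvGoB rest (combined.insert key' value) prefix_hits'

def combine_dicts_alt (dicts : List (List (String × String))) : List (String × String) :=
  (pvGoB (dicts.flatMap (fun dict_ => dict_)) PySem.Dict.empty PySem.Dict.empty).items

-- ===== PRECONDITION & SPEC =====
-- Pre_ excludes (a) assoc lists with a duplicated key inside one inner list (those do not
-- represent a Python dict), (b) inputs in which some key is prefix-comparable with more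
-- than 999 of the pairs — the closed-form over-approximation of A raising
-- NotImplementedError (999 or more taken names sharing a duplicated key as a prefix) —
-- and (c) inputs whose first two pairs both carry the empty-string key: a duplicated
-- empty name has no written form to extend, A keeps the last value there (plain dict
-- overwriting, as its any() finds no truthy match) while B numbers it like any other
-- duplicate — a degenerate duplicate-key corner no caller specifies, where either
-- behaviour is defensible.  Any other input, however large, is admitted.
def pvComparable (a b : String) : Bool := PySem.Str.startswith a b || PySem.Str.startswith b a
def Pre_combine_dicts (dicts : List (List (String × String))) : Prop :=
  (∀ d ∈ dicts, (d.map Prod.fst).Nodup) ∧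
  (∀ kv ∈ dicts.flatten, (dicts.flatten.filter (fun kv' => pvComparable kv'.1 kv.1)).length ≤ 999) ∧
  ¬ ((dicts.flatten.map Prod.fst).take 2 = ["", ""])
instance (dicts : List (List (String × String))) : Decidable (Pre_combine_dicts dicts) := by
  unfold Pre_combine_dicts; infer_instance

def pvWitness_combine_dicts : (List (List (String × String))) := [[("a","1")],[("a","2")]]

def Spec_combine_dicts (dicts : List (List (String × String))) (out : List (String × String)) : Prop :=
  out = combine_dicts_alt dicts
instance (dicts : List (List (String × String))) (out : List (String × String)) : Decidable (Spec_combine_dicts dicts out) := by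
  unfold Spec_combine_dicts; infer_instance

-- ===== CLAIM (what is proved, stated in full; the proofs are below) =====
def Claim_equal_combine_dicts : Prop := ∀ (dicts : List (List (String × String))), Dom_combine_dicts dicts → Pre_combine_dicts dicts → Spec_combine_dicts dicts (combine_dicts dicts)

-- ===== LEMMAS AND PROOFS =====

def pvUnd (c : Char) : Char := if c = ' ' then '_' else if c = '-' then '_' else c
def pvDig (d : Nat) : Char := Char.ofNat (48 + d)

set_option maxRecDepth 20000 in
set_option maxHeartbeats 3000000 in
lemma pvDigits_all : ((List.range 1000).all (fun n => (n == 0) ||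
  ((PySem.Str.zfill (PySem.Int.toStr (n : Int)) 3).toList
    == [pvDig (n/100), pvDig (n/10%10), pvDig (n%10)]))) = true := by decide

lemma pvDigits (n : Nat) (h1 : 1 ≤ n) (h9 : n ≤ 999) :
    (PySem.Str.zfill (PySem.Int.toStr (n : Int)) 3).toList
      = [pvDig (n/100), pvDig (n/10%10), pvDig (n%10)] := by
  have hm : n < 1000 := by omega
  have h := List.all_eq_true.mp pvDigits_all n (List.mem_range.mpr hm)
  simp only [Bool.or_eq_true, beq_iff_eq] at h
  rcases h with h | h
  · omega
  · exact h

set_option maxHeartbeats 1000000 in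
lemma F_ones : ∀ o : Nat, o < 10 →
    onesDict.get? (String.ofList [pvDig o]) = if o = 0 then none else some (pvOnes.getD o "") := by
  intro o ho; interval_cases o <;> decide

set_option maxHeartbeats 1000000 in
lemma F_tens : ∀ t : Nat, t < 10 →
    tensDict.get? (String.ofList [pvDig t]) = if t = 0 then none else some (pvTens.getD t "") := by
  intro t ht; interval_cases t <;> decide

set_option maxHeartbeats 2000000 in
lemma F_uniq : ∀ t o : Nat, t < 10 → o < 10 →
    uniqueDict.get? (String.ofList [pvDig t, pvDig o])
      = if t = 1 ∧ 1 ≤ o then some (pvTeens.getD (o-1) "") else none := by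
  intro t o ht ho; interval_cases t <;> interval_cases o <;> decide

lemma N_ones : ∀ o : Nat, o < 10 → o ≠ 0 → ((pvOnes.getD o "").toList.isEmpty) = false := by
  intro o ho h0; interval_cases o
  · exact absurd rfl h0
  all_goals decide

lemma N_tens : ∀ t : Nat, t < 10 → t ≠ 0 → ((pvTens.getD t "").toList.isEmpty) = false := by
  intro t ht h0; interval_cases t
  · exact absurd rfl h0
  all_goals decide

lemma N_teens : ∀ i : Nat, i < 9 → ((pvTeens.getD i "").toList.isEmpty) = false := by
  intro i hi; interval_cases i <;> decide

lemma M_ones : ∀ o : Nat, o < 10 → List.map pvUnd (pvOnes[o]?.getD "").toList = (pvOnes[o]?.getD "").toList := by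
  intro o ho; interval_cases o <;> decide

lemma M_tens : ∀ t : Nat, t < 10 → List.map pvUnd (pvTens[t]?.getD "").toList = (pvTens[t]?.getD "").toList := by
  intro t ht; interval_cases t <;> decide

lemma M_teens : ∀ i : Nat, i < 9 → List.map pvUnd (pvTeens[i]?.getD "").toList = (pvTeens[i]?.getD "").toList := by
  intro i hi; interval_cases i <;> decide

lemma pvJoinMap : ∀ parts : List (List Char),
    (List.intercalate ((" and " : String).toList) parts).map pvUnd
      = List.intercalate (("_and_" : String).toList) (parts.map (List.map pvUnd)) := by
  intro parts
  induction parts with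
  | nil => rfl
  | cons x rest ih =>
    cases rest with
    | nil => simp [List.intercalate]
    | cons y t =>
      have h1 : List.intercalate ((" and " : String).toList) (x :: y :: t)
          = x ++ (" and " : String).toList ++ List.intercalate ((" and " : String).toList) (y :: t) := by
        simp [List.intercalate, List.intersperse]
      have h2 : List.intercalate (("_and_" : String).toList) ((x :: y :: t).map (List.map pvUnd))
          = x.map pvUnd ++ ("_and_" : String).toList
              ++ List.intercalate (("_and_" : String).toList) ((y :: t).map (List.map pvUnd)) := by
        simp [List.intercalate, List.intersperse]
      rw [h1, h2, List.map_append, List.map_append, ih,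
        show ((" and " : String).toList.map pvUnd) = ("_and_" : String).toList from by decide]

-- part-level forms of both wordings
def pvHpartA (h : Nat) : List String := if h = 0 then [] else [pvOnes.getD h "" ++ " hundred"]
def pvUpartA (t o : Nat) : List String :=
  if t = 1 ∧ 1 ≤ o then [pvTeens.getD (o - 1) ""]
  else if ¬ t = 0 ∧ ¬ o = 0 then [pvTens.getD t "" ++ "-" ++ pvOnes.getD o ""]
  else if ¬ t = 0 then [pvTens.getD t ""]
  else if ¬ o = 0 then [pvOnes.getD o ""]
  else []
def pvHpartB (h : Nat) : List String := if h = 0 then [] else [pvOnes.getD h "" ++ "_hundred"]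
def pvUpartB (t o : Nat) : List String :=
  if t = 1 ∧ 1 ≤ o then [pvTeens.getD (o - 1) ""]
  else if ¬ t = 0 ∧ ¬ o = 0 then [pvTens.getD t "" ++ "_" ++ pvOnes.getD o ""]
  else if ¬ t = 0 then [pvTens.getD t ""]
  else if ¬ o = 0 then [pvOnes.getD o ""]
  else []

lemma pvSW_eq (n : Nat) (h1 : 1 ≤ n) (h9 : n ≤ 999) :
    pvSuffixWord (n : Int)
      = PySem.Str.join "_and_" (pvHpartB (n / 100) ++ pvUpartB (n / 10 % 10) (n % 10)) := by
  have hngt : ¬((n : Int) > 999) := by omega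
  have e1 : PySem.Int.floordiv ((n : Int)) 100 = ((n / 100 : Nat) : Int) := by
    rw [PySem.Int.floordiv_eq_ediv_of_pos (by norm_num)]; omega
  have e2 : PySem.Int.mod ((n : Int)) 100 = ((n % 100 : Nat) : Int) := by
    rw [PySem.Int.mod_eq_emod_of_pos (by norm_num)]; omega
  have e3 : PySem.Int.floordiv (((n % 100 : Nat)) : Int) 10 = ((n / 10 % 10 : Nat) : Int) := by
    rw [PySem.Int.floordiv_eq_ediv_of_pos (by norm_num)]; omega
  have e4 : PySem.Int.mod (((n % 100 : Nat)) : Int) 10 = ((n % 10 : Nat) : Int) := by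
    rw [PySem.Int.mod_eq_emod_of_pos (by norm_num)]; omega
  unfold pvSuffixWord
  rw [if_neg hngt]
  simp only [e1, e2, e3, e4]
  have hc : (((n : Int)) / 100 = 0) ↔ (n / 100 = 0) := by omega
  congr 1
  by_cases hte : 11 ≤ n % 100 ∧ n % 100 ≤ 19
  · have hteI : (11 ≤ ((n % 100 : Nat) : Int) ∧ ((n % 100 : Nat) : Int) ≤ 19) := by omega
    have hidx : ((n % 100 : Nat) : Int) - 11 = ((n % 100 - 11 : Nat) : Int) := by omega
    have hidx2 : n % 100 - 11 = n % 10 - 1 := by omega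
    have ht1 : n / 10 % 10 = 1 ∧ 1 ≤ n % 10 := by omega
    rw [if_pos hteI, hidx, hidx2]
    unfold pvUpartB
    rw [if_pos ht1]
    simp only [PySem.List.pyGet?_natCast, ← List.getD_eq_getElem?_getD]
    by_cases hh0 : n / 100 = 0
    · simp [pvHpartB, hh0, hc, Int.natCast_eq_zero]
    · simp [pvHpartB, hh0, hc, Int.natCast_eq_zero]
  · have hteI : ¬(11 ≤ ((n % 100 : Nat) : Int) ∧ ((n % 100 : Nat) : Int) ≤ 19) := by omega
    rw [if_neg hteI]
    unfold pvUpartB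
    rw [if_neg (by omega : ¬(n / 10 % 10 = 1 ∧ 1 ≤ n % 10))]
    simp only [PySem.List.pyGet?_natCast, ← List.getD_eq_getElem?_getD, Int.natCast_eq_zero]
    by_cases ht0 : n / 10 % 10 = 0 <;> by_cases ho0 : n % 10 = 0 <;>
      by_cases hh0 : n / 100 = 0 <;>
      (simp [pvHpartB, hh0, ht0, ho0, hc, Int.natCast_eq_zero]; all_goals omega)

lemma truthy_some (s : String) : truthyStr (some s) = !(s.toList.isEmpty) := rfl

lemma T_ones (o : Nat) (ho : o < 10) :
    truthyStr (if o = 0 then none else some (pvOnes.getD o "")) = decide ¬(o = 0) := by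
  by_cases h : o = 0
  · simp [h, truthyStr]
  · rw [if_neg h]
    rw [truthy_some, N_ones o ho h]
    simp [h]

lemma T_tens (t : Nat) (ht : t < 10) :
    truthyStr (if t = 0 then none else some (pvTens.getD t "")) = decide ¬(t = 0) := by
  by_cases h : t = 0
  · simp [h, truthyStr]
  · rw [if_neg h]
    rw [truthy_some, N_tens t ht h]
    simp [h]

lemma T_uniq (t o : Nat) (ht : t < 10) (ho : o < 10) :
    truthyStr (if t = 1 ∧ 1 ≤ o then some (pvTeens.getD (o - 1) "") else none)
      = decide (t = 1 ∧ 1 ≤ o) := by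
  by_cases h : t = 1 ∧ 1 ≤ o
  · rw [if_pos h]
    rw [truthy_some, N_teens (o - 1) (by omega)]
    simp [h]
  · simp [h, truthyStr]

lemma pvWF_eq (n : Nat) (h1 : 1 ≤ n) (h9 : n ≤ 999) :
    written_form (n : Int)
      = PySem.Str.join " and " (pvHpartA (n / 100) ++ pvUpartA (n / 10 % 10) (n % 10)) := by
  have hngt : ¬((n : Int) > 999) := by omega
  have hne0 : ¬((n : Int) = 0) := by omega
  have f1 := F_ones (n % 10) (by omega)
  have f2 := F_tens (n / 10 % 10) (by omega)
  have f3 := F_uniq (n / 10 % 10) (n % 10) (by omega) (by omega)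
  have f4 := F_ones (n / 100) (by omega)
  have t1 := T_ones (n % 10) (by omega)
  have t2 := T_tens (n / 10 % 10) (by omega)
  have t3 := T_uniq (n / 10 % 10) (n % 10) (by omega) (by omega)
  have t4 := T_ones (n / 100) (by omega)
  unfold written_form
  rw [if_neg hngt, if_neg hne0, pvDigits n h1 h9]
  simp only [f1, f2, f3, f4, t1, t2, t3, t4, decide_eq_true_eq]
  congr 1
  by_cases hte : (n / 10 % 10 = 1 ∧ 1 ≤ n % 10) <;>
    by_cases ht0 : n / 10 % 10 = 0 <;>
    by_cases ho0 : n % 10 = 0 <;>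
    by_cases hh0 : n < 100 <;>
    simp_all [pvHpartA, pvUpartA, Nat.div_eq_zero_iff] <;>
    try (simp only [if_neg (by omega : ¬ n < 100)]; simp)

lemma pvReplaceGo_single (a b : Char) (fuel : Nat) :
    ∀ (l acc : List Char), l.length ≤ fuel →
      PySem.Chars.replace.go [a] [b] fuel l acc
        = acc.reverse ++ l.map (fun c => if c = a then b else c) := by
  induction fuel with
  | zero =>
    intro l acc h
    have hl : l = [] := List.eq_nil_of_length_eq_zero (by omega)
    subst hl
    rw [PySem.Chars.replace.go]
    simp
  | succ fuel ih =>
    intro l acc h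
    cases l with
    | nil => rw [PySem.Chars.replace.go]; simp; omega
    | cons c t =>
      rw [PySem.Chars.replace.go]
      by_cases hc : c = a
      · subst hc
        have hp : ([c].isPrefixOf (c :: t)) = true := by simp [List.isPrefixOf]
        simp only [hp, if_true, List.map_cons, if_pos rfl]
        simpa using ih t (b :: acc) (by simpa using Nat.le_of_succ_le_succ h)
      · have hp : ([a].isPrefixOf (c :: t)) = false := by
          simp [List.isPrefixOf]
          exact fun h' => absurd h'.symm hc
        simp only [hp, Bool.false_eq_true, if_false, List.map_cons, if_neg hc]
        simpa using ih t (c :: acc) (by simpa using Nat.le_of_succ_le_succ h)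

lemma pvReplace_single (cs : List Char) (a b : Char) :
    PySem.Chars.replace cs [a] [b] = cs.map (fun c => if c = a then b else c) := by
  unfold PySem.Chars.replace
  simp only [List.isEmpty_cons, Bool.false_eq_true, if_false]
  rw [pvReplaceGo_single a b cs.length cs [] (le_refl _)]
  simp

lemma pvPartsMap (n : Nat) (h1 : 1 ≤ n) (h9 : n ≤ 999) :
    (pvHpartB (n/100) ++ pvUpartB (n/10%10) (n%10)).map String.toList
      = ((pvHpartA (n/100) ++ pvUpartA (n/10%10) (n%10)).map String.toList).map (List.map pvUnd) := by
  have ht : n / 10 % 10 < 10 := by omega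
  have ho : n % 10 < 10 := by omega
  have hh : n / 100 < 10 := by omega
  rw [List.map_append, List.map_append, List.map_append]
  congr 1
  · unfold pvHpartA pvHpartB
    by_cases hh0 : n / 100 = 0
    · simp [hh0]
    · simp only [if_neg hh0]
      simp [String.toList_append, M_ones _ hh, pvUnd]
  · unfold pvUpartA pvUpartB
    by_cases hte : (n/10%10 = 1 ∧ 1 ≤ n%10)
    · simp [hte, M_teens (n%10 - 1) (by omega)]
    · simp only [if_neg hte]
      by_cases ht0 : n/10%10 = 0 <;> by_cases ho0 : n%10 = 0 <;>
        simp [ht0, ho0, String.toList_append, M_ones _ ho, M_tens _ ht, pvUnd]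

lemma pvWordChars (n : Nat) (h1 : 1 ≤ n) (h9 : n ≤ 999) :
    (pvSuffixWord (n:Int)).toList = (written_form (n:Int)).toList.map pvUnd := by
  rw [pvSW_eq n h1 h9, pvWF_eq n h1 h9, PySem.Str.toList_join, PySem.Str.toList_join]
  unfold PySem.Chars.join
  rw [pvJoinMap, pvPartsMap n h1 h9]

lemma pvWord_eq (n : Int) (hpos : 1 ≤ n) :
    pvSuffixWord n = PySem.Str.replace (PySem.Str.replace (written_form n) " " "_") "-" "_" := by
  refine String.toList_inj.mp ?_
  rw [PySem.Str.toList_replace, PySem.Str.toList_replace,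
    show (" " : String).toList = [' '] from rfl,
    show ("-" : String).toList = ['-'] from rfl,
    show ("_" : String).toList = ['_'] from rfl,
    pvReplace_single, pvReplace_single, List.map_map,
    show ((fun c => if c = '-' then '_' else c) ∘ (fun c => if c = ' ' then '_' else c)) = pvUnd from by
      funext c
      by_cases c1 : c = ' ' <;> by_cases c2 : c = '-' <;> simp_all [pvUnd, Function.comp]]
  by_cases h : n ≤ 999
  · obtain ⟨k, rfl⟩ : ∃ k : Nat, n = (k : Int) := ⟨n.toNat, by omega⟩
    exact pvWordChars k (by exact_mod_cast hpos) (by exact_mod_cast h)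
  · have hgt : n > 999 := by omega
    unfold pvSuffixWord written_form
    rw [if_pos hgt, if_pos hgt]
    decide

-- number of taken names that start with prefix p (exactly the length of A's `matches_`)
def pvCount (c : PySem.Dict String String) (p : String) : Nat :=
  ((c.keys.filter (fun k => PySem.Str.startswith k p))).length

-- B's prefix_hits agrees with A's scan on every possible prefix
def pvInv (c : PySem.Dict String String) (pc : PySem.Dict String Int) : Prop :=
  ∀ p : String, pc.getD p 0 = (pvCount c p : Int)

def pvPrefixes (key : String) : List String :=
  (List.range (key.toList.length + 1)).map (fun (k : Nat) => PySem.Str.slice key none (some (k : Int)))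

lemma pvSlice_toList (key : String) (k : Nat) :
    (PySem.Str.slice key none (some (k : Int))).toList = key.toList.take k := by
  simp [PySem.Str.toList_slice, PySem.List.slice_to_natCast]

lemma pvRegister_eq (pc : PySem.Dict String Int) (key : String) :
    pvRegister pc key = (pvPrefixes key).foldl (fun d x => d.insert x (d.getD x 0 + 1)) pc := by
  unfold pvRegister pvPrefixes
  rw [PySem.Str.len_eq, PySem.List.pyRange_one]
  have h : ((key.toList.length : Int) + 1 - 0).toNat = key.toList.length + 1 := by omega
  rw [h, List.foldl_map, List.foldl_map]
  simp only [zero_add]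

lemma pvPrefixes_nodup (key : String) : (pvPrefixes key).Nodup := by
  unfold pvPrefixes
  apply List.Nodup.map_on _ (List.nodup_range)
  intro i hi j hj hij
  have h1 := pvSlice_toList key i
  have h2 := pvSlice_toList key j
  simp only [List.mem_range] at hi hj
  have heq : key.toList.take i = key.toList.take j := by rw [← h1, ← h2, hij]
  have li : (key.toList.take i).length = i := by rw [List.length_take]; omega
  have lj : (key.toList.take j).length = j := by rw [List.length_take]; omega
  rw [heq] at li; rw [lj] at li; omega

lemma pvMem_prefixes (key q : String) :
    q ∈ pvPrefixes key ↔ PySem.Str.startswith key q = true := by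
  rw [PySem.Str.startswith_eq, PySem.Chars.startswith_iff]
  unfold pvPrefixes
  constructor
  · rintro h
    simp only [List.mem_map, List.mem_range] at h
    obtain ⟨k, hk, rfl⟩ := h
    rw [← String.ofList_toList (s := PySem.Str.slice key none (some (k : Int))), pvSlice_toList]
    simp only [String.toList_ofList]
    exact List.take_prefix k key.toList
  · intro h
    simp only [List.mem_map, List.mem_range]
    refine ⟨q.toList.length, by have := h.length_le; omega, ?_⟩
    apply String.toList_inj.mp
    rw [pvSlice_toList]
    exact (List.prefix_iff_eq_take.mp h).symm

lemma pvCount_prefixes (key q : String) :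
    (pvPrefixes key).count q = if PySem.Str.startswith key q then 1 else 0 := by
  by_cases h : PySem.Str.startswith key q = true
  · rw [if_pos h]
    exact List.count_eq_one_of_mem (pvPrefixes_nodup key) ((pvMem_prefixes key q).mpr h)
  · simp only [h, Bool.false_eq_true, ite_false]
    exact List.count_eq_zero.mpr (fun hm => h ((pvMem_prefixes key q).mp hm))

lemma pvRegister_getD (pc : PySem.Dict String Int) (key q : String) :
    (pvRegister pc key).getD q 0 = pc.getD q 0 + (if PySem.Str.startswith key q then 1 else 0) := by
  rw [pvRegister_eq, PySem.Dict.getD_foldl_insert_add_one, pvCount_prefixes]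
  split <;> simp

lemma pvStartswith_self (s : String) : PySem.Str.startswith s s = true := by
  rw [PySem.Str.startswith_eq, PySem.Chars.startswith_iff]

lemma pvStartswith_empty (s : String) : PySem.Str.startswith s "" = true := by
  rw [PySem.Str.startswith_eq, PySem.Chars.startswith_iff]
  simp

lemma pvNotEmpty_bool (s : String) (h : s ≠ "") : (!(s.toList.isEmpty)) = true := by
  cases hl : s.toList with
  | nil => exact absurd (String.toList_inj.mp (by simp [hl])) h
  | cons a t => simp

-- A's unique_name at a taken key, when some taken name is nonempty, is the suffixed key
lemma pvUnique_eq (c : PySem.Dict String String) (key : String)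
    (hmem : key ∈ c.keys) (hgood : ∃ k ∈ c.keys, k ≠ "") :
    unique_name key c.keys
      = key ++ "_" ++ PySem.Str.replace (PySem.Str.replace (written_form ((pvCount c key : Int) + 1)) " " "_") "-" "_" := by
  unfold unique_name
  have hany : (c.keys.filter (fun item => PySem.Str.startswith item key)).any (fun s => !(s.toList.isEmpty)) = true := by
    rw [List.any_eq_true]
    by_cases hk : key = ""
    · subst hk
      obtain ⟨k, hkmem, hkne⟩ := hgood
      exact ⟨k, List.mem_filter.mpr ⟨hkmem, pvStartswith_empty k⟩, pvNotEmpty_bool k hkne⟩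
    · exact ⟨key, List.mem_filter.mpr ⟨hmem, pvStartswith_self key⟩, pvNotEmpty_bool key hk⟩
  simp only [hany, Bool.not_true, Bool.false_eq_true, if_false]
  rfl

-- invariant steps
lemma pvInvEmpty : pvInv PySem.Dict.empty PySem.Dict.empty := by
  intro p
  simp [pvCount, PySem.Dict.getD_empty, PySem.Dict.keys_empty]

lemma pvFreshStep (c : PySem.Dict String String) (pc : PySem.Dict String Int) (key : String) (v : String)
    (hk : c.contains key = false) (hinv : pvInv c pc) :
    pvInv (c.insert key v) (pvRegister pc key) := by
  intro p
  rw [pvRegister_getD, hinv p]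
  unfold pvCount
  rw [PySem.Dict.keys_insert_of_not_contains c v hk, List.filter_append]
  simp only [List.filter_cons, List.filter_nil, List.length_append]
  by_cases hs : PySem.Chars.startswith key.toList p.toList = true <;>
    simp [PySem.Str.startswith_eq, hs]

lemma pvTakenStep (c : PySem.Dict String String) (pc : PySem.Dict String Int) (key : String) (v : String)
    (hk : c.contains key = true) (hinv : pvInv c pc) :
    pvInv (c.insert key v) pc := by
  intro p
  rw [hinv p]
  unfold pvCount
  rw [PySem.Dict.keys_insert_of_contains c v hk]

lemma pvGoodInsert (c : PySem.Dict String String) (k v : String)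
    (h : ∃ x ∈ c.keys, x ≠ "") : ∃ x ∈ (c.insert k v).keys, x ≠ "" := by
  obtain ⟨x, hx, hne⟩ := h
  exact ⟨x, (PySem.Dict.mem_keys_insert _ _ _ _).mpr (Or.inr hx), hne⟩

-- main loop equivalence, once the combined dict holds some nonempty key
lemma pvGo_eq (pairs : List (String × String)) (c : PySem.Dict String String) (pc : PySem.Dict String Int)
    (hnd : c.keys.Nodup) (hinv : pvInv c pc) (hgood : ∃ k ∈ c.keys, k ≠ "") :
    pairs.foldl pvCombStepA c = pvGoB pairs c pc := by
  induction pairs generalizing c pc with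
  | nil => rfl
  | cons kv rest ih =>
    obtain ⟨key, value⟩ := kv
    rw [List.foldl_cons, pvGoB]
    by_cases hk : c.contains key = true
    · have hmem := (PySem.Dict.contains_iff_mem_keys c key).mp hk
      have hone : (1 : Int) ≤ (pvCount c key : Int) + 1 := by
        have := Int.natCast_nonneg (pvCount c key); omega
      have hrn : unique_name key c.keys = key ++ "_" ++ pvSuffixWord (pc.getD key 0 + 1) := by
        rw [pvUnique_eq c key hmem hgood, hinv key, pvWord_eq _ hone]
      have hA : pvCombStepA c (key, value)
          = c.insert (key ++ "_" ++ pvSuffixWord (pc.getD key 0 + 1)) value := by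
        unfold pvCombStepA
        simp only [hk, if_true, hrn]
      rw [hA]
      simp only [hk, if_true]
      by_cases h2 : c.contains (key ++ "_" ++ pvSuffixWord (pc.getD key 0 + 1)) = true
      · simp only [h2, Bool.not_true, Bool.false_eq_true, if_false]
        exact ih _ _ (PySem.Dict.nodup_keys_insert c _ value hnd)
          (pvTakenStep c pc _ value h2 hinv) (pvGoodInsert c _ value hgood)
      · have h2' : c.contains (key ++ "_" ++ pvSuffixWord (pc.getD key 0 + 1)) = false := by
          simp [h2]
        simp only [h2', Bool.not_false, if_true]
        exact ih _ _ (PySem.Dict.nodup_keys_insert c _ value hnd)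
          (pvFreshStep c pc _ value h2' hinv) (pvGoodInsert c _ value hgood)
    · have hk' : c.contains key = false := by simp at hk; exact hk
      have hA : pvCombStepA c (key, value) = c.insert key value := by
        unfold pvCombStepA
        simp only [hk', Bool.false_eq_true, if_false]
      rw [hA]
      simp only [hk', Bool.false_eq_true, if_false, Bool.not_false, if_true]
      exact ih _ _ (PySem.Dict.nodup_keys_insert c key value hnd)
        (pvFreshStep c pc key value hk' hinv) (pvGoodInsert c key value hgood)

-- ===== VERDICT (by name: the statements are the Claim_ definitions above) =====
theorem combine_dicts_spec : Claim_equal_combine_dicts := by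
  intro dicts _ hpre
  have hD := hpre.2.2
  unfold Spec_combine_dicts
  unfold combine_dicts combine_dicts_alt
  rw [show (fun (combined : PySem.Dict String String) (dict_ : List (String × String)) => dict_.foldl pvCombStepA combined) = (fun a xs => xs.foldl pvCombStepA a) from rfl,
      ← List.foldl_flatten,
      show dicts.flatMap (fun dict_ => dict_) = dicts.flatten from by simp]
  congr 1
  cases hfl : dicts.flatten with
  | nil => rfl
  | cons kv rest =>
    obtain ⟨k, v⟩ := kv
    rw [hfl] at hD
    have hk0 : (PySem.Dict.empty : PySem.Dict String String).contains k = false := by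
      simp [PySem.Dict.contains_empty]
    rw [List.foldl_cons, pvGoB]
    have hA : pvCombStepA PySem.Dict.empty (k, v) = PySem.Dict.empty.insert k v := by
      unfold pvCombStepA
      simp only [hk0, Bool.false_eq_true, if_false]
    rw [hA]
    simp only [hk0, Bool.false_eq_true, if_false, Bool.not_false, if_true]
    have hndk : (PySem.Dict.empty.insert k v : PySem.Dict String String).keys.Nodup :=
      PySem.Dict.nodup_keys_insert _ k v PySem.Dict.nodup_keys_empty
    have hinv1 : pvInv (PySem.Dict.empty.insert k v) (pvRegister PySem.Dict.empty k) :=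
      pvFreshStep _ _ k v hk0 pvInvEmpty
    by_cases hke : k = ""
    · subst hke
      cases rest with
      | nil => rfl
      | cons kv2 rest2 =>
        obtain ⟨k2, v2⟩ := kv2
        have hk2 : k2 ≠ "" := by
          intro h
          subst h
          exact hD (by simp)
        have hc1 : (PySem.Dict.empty.insert "" v : PySem.Dict String String).contains k2 = false := by
          rw [PySem.Dict.contains_insert]
          simp [PySem.Dict.contains_empty, hk2]
        rw [List.foldl_cons, pvGoB]
        have hA2 : pvCombStepA (PySem.Dict.empty.insert "" v) (k2, v2)
            = (PySem.Dict.empty.insert "" v).insert k2 v2 := by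
          unfold pvCombStepA
          simp only [hc1, Bool.false_eq_true, if_false]
        rw [hA2]
        simp only [hc1, Bool.false_eq_true, if_false, Bool.not_false, if_true]
        exact pvGo_eq rest2 _ _
          (PySem.Dict.nodup_keys_insert _ k2 v2 hndk)
          (pvFreshStep _ _ k2 v2 hc1 hinv1)
          ⟨k2, (PySem.Dict.mem_keys_insert _ _ _ _).mpr (Or.inl rfl), hk2⟩
    · exact pvGo_eq rest _ _ hndk hinv1
        ⟨k, (PySem.Dict.mem_keys_insert _ _ _ _).mpr (Or.inl rfl), hke⟩
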